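-- pv_equiv track=rewrite | github.com/Lewall-theart/Audit_Tool | analyzers/attribute_extractor.py | _extract_startup_items
-- ===== SOURCE A (Python) =====
-- def _extract_startup_items(lines):
--     in_section = False
--     in_table = False
--     count = 0
--     for line in lines:
--         stripped = line.strip()
--         lower = stripped.lower()
--         if "[+] kiem tra start up list" in lower:
--             in_section = True
--             continue
--         if in_section and "[+] kiem tra task schedule" in lower:
--             break
--         if not in_section:
--             continue
--
--         if lower.startswith("caption"):
--             in_table = True
--             continue
--         if in_table:
--             if not stripped or stripped.startswith("#-#") or stripped.lower().startswith("hkey_"):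
--                 in_table = False
--                 continue
--             count += 1
--
--     return count if in_section else None
-- ===== SOURCE B (Python) =====
-- def _extract_startup_items(lines):
--     START = "[+] kiem tra start up list"
--     END = "[+] kiem tra task schedule"
--     rows = [(line.strip(), line.strip().lower()) for line in lines]
--
--     # phase 1: rows after the first start-marker row; no marker -> no section
--     rest = None
--     for i, (_, low) in enumerate(rows):
--         if START in low:
--             rest = rows[i + 1:]
--             break
--     if rest is None:
--         return None
--
--     # phase 2: the section ends at the first end-marker row (or at end of input)
--     section = []
--     for s, low in rest:
--         if END in low:
--             break
--         section.append((s, low))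
--
--     # phase 3: count table rows; a 'caption' header opens a table,
--     # a blank / '#-#' / 'hkey_' row closes it
--     count = 0
--     in_table = False
--     for s, low in section:
--         if low.startswith("caption"):
--             in_table = True
--         elif in_table:
--             if not s or s.startswith("#-#") or low.startswith("hkey_"):
--                 in_table = False
--             else:
--                 count += 1
--     return count
-- ===== Notes on version B (the rewrite author's own statement) =====
-- stated objective: alternative
-- what changed: Replaced A's single interleaved loop with three flags and break/continue by three separate phases (find the section-start row, truncate at the section-end row, run the table state machine over the bounded sub-list); Pre_ excludes inputs where the start-marker substring occurs in more than one line, on which A's continue-first branch ordering (repeated header lines are silently skipped and can never terminate the section) is an accident of its interleaved loop.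
import Mathlib
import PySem

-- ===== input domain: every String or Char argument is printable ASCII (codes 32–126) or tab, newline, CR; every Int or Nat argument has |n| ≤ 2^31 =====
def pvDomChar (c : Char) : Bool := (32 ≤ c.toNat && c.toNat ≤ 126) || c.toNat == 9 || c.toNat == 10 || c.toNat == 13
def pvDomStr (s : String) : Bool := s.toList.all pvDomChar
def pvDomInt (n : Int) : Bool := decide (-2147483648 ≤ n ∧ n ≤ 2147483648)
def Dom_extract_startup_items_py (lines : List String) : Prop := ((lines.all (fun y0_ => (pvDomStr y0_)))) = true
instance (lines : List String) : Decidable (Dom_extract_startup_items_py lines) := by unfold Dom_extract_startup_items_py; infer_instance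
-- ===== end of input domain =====

-- B replaces A's single interleaved three-flag loop by three separate phases
-- (find the section start, bound the section, run the table state machine); objective: alternative decomposition, same cost.

-- ===== PORT A =====
-- A's for-loop with `break`/`continue` and state (in_section, in_table, count),
-- transliterated as structural recursion over the lines; the final
-- `return count if in_section else None` is the [] case, `break` returns directly.
def pvLoopA : List String → Bool → Bool → Int → Option Int
  | [], in_section, _, count => if in_section then some count else none
  | line :: ls, in_section, in_table, count =>
    let stripped := PySem.Str.strip line
    let lower := PySem.Str.lower stripped
    if PySem.Str.isIn "[+] kiem tra start up list" lower then
      pvLoopA ls true in_table count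
    else if in_section && PySem.Str.isIn "[+] kiem tra task schedule" lower then
      some count          -- break; in_section is true here
    else if !in_section then
      pvLoopA ls in_section in_table count
    else if PySem.Str.startswith lower "caption" then
      pvLoopA ls in_section true count
    else if in_table then
      if stripped == "" || PySem.Str.startswith stripped "#-#"
          || PySem.Str.startswith (PySem.Str.lower stripped) "hkey_" then
        pvLoopA ls in_section false count
      else
        pvLoopA ls in_section in_table (count + 1)
    else
      pvLoopA ls in_section in_table count

def extract_startup_items_py (lines : List String) : Option Int :=
  pvLoopA lines false false 0

-- ===== PORT B =====
-- rows = [(line.strip(), line.strip().lower()) for line in lines]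
def pvRowOf (line : String) : String × String :=
  (PySem.Str.strip line, PySem.Str.lower (PySem.Str.strip line))

-- phase 1: the rows after the first start-marker row (None if no such row)
def pvFindRest : List (String × String) → Option (List (String × String))
  | [] => none
  | r :: rs => if PySem.Str.isIn "[+] kiem tra start up list" r.2 then some rs else pvFindRest rs

-- phase 2: the section = rows up to the first end-marker row
def pvTakeSection : List (String × String) → List (String × String)
  | [] => []
  | r :: rs =>
    if PySem.Str.isIn "[+] kiem tra task schedule" r.2 then []
    else r :: pvTakeSection rs

-- phase 3: the table state machine
def pvLoop3 : List (String × String) → Bool → Int → Int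
  | [], _, count => count
  | (s, low) :: rs, in_table, count =>
    if PySem.Str.startswith low "caption" then
      pvLoop3 rs true count
    else if in_table then
      if s == "" || PySem.Str.startswith s "#-#" || PySem.Str.startswith low "hkey_" then
        pvLoop3 rs false count
      else
        pvLoop3 rs in_table (count + 1)
    else
      pvLoop3 rs in_table count

def extract_startup_items_py_alt (lines : List String) : Option Int :=
  match pvFindRest (lines.map pvRowOf) with
  | none => none
  | some rest => some (pvLoop3 (pvTakeSection rest) false 0)

-- ===== PRECONDITION & SPEC =====
-- Pre_ excludes inputs where the start-marker substring occurs in more than one line (A still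
-- returns a value there): on such repeated-header inputs A's continue-first branch ordering
-- (a repeated header line is silently skipped and can never terminate the section) is an
-- accidental artefact of its interleaved loop, and B's plain sectioning is equally defensible.
def Pre_extract_startup_items_py (lines : List String) : Prop :=
  lines.countP
    (fun l => PySem.Str.isIn "[+] kiem tra start up list" (PySem.Str.lower (PySem.Str.strip l))) ≤ 1
instance (lines : List String) : Decidable (Pre_extract_startup_items_py lines) := by
  unfold Pre_extract_startup_items_py; infer_instance

def pvWitness_extract_startup_items_py : List String :=
  ["[+] Kiem tra Start Up list", "Caption  Command", "row one", "", "other"]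

def Spec_extract_startup_items_py (lines : List String) (out : Option Int) : Prop := out = extract_startup_items_py_alt lines
instance (lines : List String) (out : Option Int) : Decidable (Spec_extract_startup_items_py lines out) := by unfold Spec_extract_startup_items_py; infer_instance

-- ===== CLAIM (what is proved, stated in full; the proofs are below) =====
def Claim_equal_extract_startup_items_py : Prop := ∀ (lines : List String), Dom_extract_startup_items_py lines → Pre_extract_startup_items_py lines → Spec_extract_startup_items_py lines (extract_startup_items_py lines)

-- ===== LEMMAS AND PROOFS =====

-- Inside the section, given that no further line carries the start marker,
-- A's loop computes the phase-3 machine over the bounded section.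
theorem pvLoopA_in_section (ls : List String)
    (h : ∀ l ∈ ls, ¬ PySem.Str.isIn "[+] kiem tra start up list" (PySem.Str.lower (PySem.Str.strip l)) = true) :
    ∀ (in_table : Bool) (count : Int),
    pvLoopA ls true in_table count
      = some (pvLoop3 (pvTakeSection (ls.map pvRowOf)) in_table count) := by
  induction ls with
  | nil => intro in_table count; simp [pvLoopA, pvTakeSection, pvLoop3]
  | cons line ls ih =>
    intro in_table count
    have h1 := h line (List.mem_cons_self ..)
    have hrest : ∀ l ∈ ls, ¬ PySem.Str.isIn "[+] kiem tra start up list" (PySem.Str.lower (PySem.Str.strip l)) = true :=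
      fun l hl => h l (List.mem_cons_of_mem _ hl)
    simp only [pvLoopA, List.map_cons, pvRowOf, pvTakeSection]
    rw [if_neg h1]
    split_ifs <;> cases in_table <;> simp_all [pvLoop3, ih hrest]

-- Before the section, A's loop scans for the start marker exactly as phase 1 does.
theorem pvLoopA_eq_alt (ls : List String)
    (hpre : Pre_extract_startup_items_py ls) :
    pvLoopA ls false false 0 = extract_startup_items_py_alt ls := by
  induction ls with
  | nil => simp [pvLoopA, extract_startup_items_py_alt, pvFindRest]
  | cons line ls ih =>
    simp only [pvLoopA, extract_startup_items_py_alt, List.map_cons, pvRowOf, pvFindRest]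
    simp only [extract_startup_items_py_alt] at ih
    unfold Pre_extract_startup_items_py at hpre ih
    rw [List.countP_cons] at hpre
    by_cases h1 : PySem.Str.isIn "[+] kiem tra start up list" (PySem.Str.lower (PySem.Str.strip line)) = true
    · rw [if_pos h1, if_pos h1]
      rw [if_pos h1] at hpre
      have hnone : ∀ l ∈ ls, ¬ PySem.Str.isIn "[+] kiem tra start up list" (PySem.Str.lower (PySem.Str.strip l)) = true := by
        have hz : ls.countP (fun l => PySem.Str.isIn "[+] kiem tra start up list" (PySem.Str.lower (PySem.Str.strip l))) = 0 := by omega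
        simpa using (List.countP_eq_zero.mp hz)
      exact pvLoopA_in_section ls hnone false 0
    · rw [if_neg h1, if_neg h1]
      rw [if_neg h1] at hpre
      have : ls.countP (fun l => PySem.Str.isIn "[+] kiem tra start up list" (PySem.Str.lower (PySem.Str.strip l))) ≤ 1 := by omega
      simpa using ih this

-- ===== VERDICT (by name: the statement is the Claim_ definition above) =====
theorem extract_startup_items_py_spec : Claim_equal_extract_startup_items_py := by
  intro lines _ hpre
  unfold Spec_extract_startup_items_py extract_startup_items_py
  exact pvLoopA_eq_alt lines hpre
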